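-- pv_equiv track=rewrite | github.com/RobbeW/Data_Statistiek_R | Deel 3 Algoritmiek/03 Hogere dimensie/Evaluatie/12 Symmetrische matrix/solution/solution.nl.py | symmetrisch
-- ===== SOURCE A (Python) =====
-- def symmetrisch(n):
--     matrix = []
--     for r in range(n):
--         rij = []
--         for c in range(n):
--             element = abs(r - c)
--             rij.append(element)
--         matrix.append(rij)
--
--     return matrix
-- ===== SOURCE B (Python) =====
-- def symmetrisch(n):
--     matrix = []
--     row = list(range(n))
--     for _ in range(n):
--         matrix.append(row)
--         row = [row[0] + 1] + row[:-1]
--     return matrix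
-- ===== Notes on version B (the rewrite author's own statement) =====
-- stated objective: alternative
-- what changed: Instead of computing abs(r-c) per cell, B builds the matrix incrementally: the first row is list(range(n)) and each subsequent row is derived from the previous one by prepending its head incremented and dropping its last element.
import Mathlib
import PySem

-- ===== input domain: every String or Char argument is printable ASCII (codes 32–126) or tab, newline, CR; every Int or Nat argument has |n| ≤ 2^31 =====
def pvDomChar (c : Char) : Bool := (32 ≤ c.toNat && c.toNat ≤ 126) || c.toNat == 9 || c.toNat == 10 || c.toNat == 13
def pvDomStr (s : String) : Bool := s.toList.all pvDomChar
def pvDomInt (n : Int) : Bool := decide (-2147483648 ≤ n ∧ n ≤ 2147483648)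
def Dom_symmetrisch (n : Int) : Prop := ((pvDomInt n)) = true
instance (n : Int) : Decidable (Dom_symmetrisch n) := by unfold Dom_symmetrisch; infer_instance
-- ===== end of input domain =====

-- B builds each row incrementally from the previous one instead of computing abs per cell (alternative decomposition, same cost).


-- ===== PORT A =====
def symmetrisch (n : Int) : List (List Int) :=
  (PySem.List.pyRange 0 n 1).foldl
    (fun matrix r =>
      matrix ++ [(PySem.List.pyRange 0 n 1).foldl (fun rij c => rij ++ [|r - c|]) []])
    []

-- ===== PORT B =====
-- the loop 'for _ in range(n): matrix.append(row); row = [row[0]+1] + row[:-1]'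
-- (row[0] is only read when n > 0, where row is nonempty; headD transcribes it there)
def symAltLoop (k : Nat) (matrix : List (List Int)) (row : List Int) : List (List Int) :=
  match k with
  | 0 => matrix
  | k + 1 => symAltLoop k (matrix ++ [row]) ((row.headD 0 + 1) :: row.dropLast)

def symmetrisch_alt (n : Int) : List (List Int) :=
  symAltLoop n.toNat [] (PySem.List.pyRange 0 n 1)

-- ===== PRECONDITION & SPEC =====
def Spec_symmetrisch (n : Int) (out : List (List Int)) : Prop := out = symmetrisch_alt n
instance (n : Int) (out : List (List Int)) : Decidable (Spec_symmetrisch n out) := by unfold Spec_symmetrisch; infer_instance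

-- ===== CLAIM (what is proved, stated in full; the proofs are below) =====
def Claim_equal_symmetrisch : Prop := ∀ (n : Int), Dom_symmetrisch n → Spec_symmetrisch n (symmetrisch n)

-- ===== LEMMAS AND PROOFS =====

-- the r-th row of the matrix, as A computes it
def rowF (m : Nat) (r : Int) : List Int := List.map (fun (c : Nat) => |r - (c : Int)|) (List.range m)

theorem foldl_snoc_map {α β : Type} (f : β → α) (xs : List β) (acc : List α) :
    xs.foldl (fun a x => a ++ [f x]) acc = acc ++ xs.map f := by
  induction xs generalizing acc with
  | nil => simp
  | cons x xs ih => simp [ih]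

theorem rowF_step (m : Nat) (r : Int) (hm : 0 < m) (hr : 0 ≤ r) :
    ((rowF m r).headD 0 + 1) :: (rowF m r).dropLast = rowF m (r + 1) := by
  cases m with
  | zero => omega
  | succ j =>
    have h1 : (rowF (j + 1) r).headD 0 = |r - ((0 : Nat) : Int)| := by
      rw [rowF, List.range_succ_eq_map, List.map_cons, List.headD_cons]
    have h2 : (rowF (j + 1) r).dropLast =
        List.map (fun (c : Nat) => |r - (c : Int)|) (List.range j) := by
      rw [rowF, List.range_succ, List.map_append, List.map_singleton, List.dropLast_concat]
    rw [h1, h2, rowF, List.range_succ_eq_map, List.map_cons, List.map_map]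
    refine congrArg₂ _ ?_ ?_
    · rw [abs_of_nonneg (by omega), abs_of_nonneg (by omega)]; push_cast; ring
    · refine List.map_congr_left ?_
      intro k _
      simp only [Function.comp]
      congr 1
      push_cast
      ring

theorem symAltLoop_eq (m : Nat) : ∀ (k : Nat) (acc : List (List Int)) (r : Int),
    0 ≤ r → 0 < m →
    symAltLoop k acc (rowF m r) =
      acc ++ (List.range k).map (fun (i : Nat) => rowF m (r + (i : Int))) := by
  intro k
  induction k with
  | zero => intro acc r _ _; simp [symAltLoop]
  | succ k ih =>
    intro acc r hr hm
    rw [symAltLoop, rowF_step m r hm hr, ih _ (r + 1) (by omega) hm,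
      List.range_succ_eq_map, List.map_cons, List.map_map, List.append_assoc,
      List.singleton_append]
    refine congrArg _ ?_
    refine congrArg₂ _ (by norm_num) ?_
    refine List.map_congr_left ?_
    intro i _
    simp only [Function.comp]
    congr 1
    push_cast
    ring

theorem pyRange_eq_rowF (n : Int) : PySem.List.pyRange 0 n 1 = rowF n.toNat 0 := by
  rw [PySem.List.pyRange_one, rowF]
  simp only [Int.sub_zero]
  refine List.map_congr_left ?_
  intro k _
  rw [zero_add, abs_of_nonpos (by omega)]
  ring

theorem inner_eq (n r : Int) :
    (PySem.List.pyRange 0 n 1).foldl (fun rij c => rij ++ [|r - c|]) [] = rowF n.toNat r := by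
  rw [foldl_snoc_map, List.nil_append, PySem.List.pyRange_one, List.map_map, rowF]
  simp only [Int.sub_zero]
  refine List.map_congr_left ?_
  intro k _
  simp [Function.comp]

-- ===== VERDICT (by name: the statement is the Claim_ definition above) =====
theorem symmetrisch_spec : Claim_equal_symmetrisch := by
  intro n _
  unfold Spec_symmetrisch symmetrisch symmetrisch_alt
  by_cases hn : n ≤ 0
  · rw [PySem.List.pyRange_one_eq_nil hn]
    have h0 : n.toNat = 0 := by omega
    simp [h0, symAltLoop]
  · have hm : 0 < n.toNat := by omega
    have hB : symAltLoop n.toNat [] (PySem.List.pyRange 0 n 1) =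
        (List.range n.toNat).map (fun (i : Nat) => rowF n.toNat (i : Int)) := by
      rw [pyRange_eq_rowF, symAltLoop_eq n.toNat n.toNat [] 0 le_rfl hm, List.nil_append]
      simp
    rw [hB, foldl_snoc_map, List.nil_append]
    simp only [inner_eq]
    rw [PySem.List.pyRange_one, List.map_map]
    simp only [Int.sub_zero]
    refine List.map_congr_left ?_
    intro k _
    simp [Function.comp]
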